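-- pv_equiv track=rewrite | github.com/Taewoong-Ha/Rosalind | bioinformatics_stringhold/PROB_Introduction_to_Random_Strings.py | allele_count
-- ===== SOURCE A (Python) =====
-- def allele_count(S):
--     at = 0
--     gc = 0
--     for s in S:
--         if s == "A" or s == "T":
--             at += 1
--         else:
--             gc += 1
--     return at, gc
-- ===== SOURCE B (Python) =====
-- def allele_count(S):
--     rest = S.replace("A", "").replace("T", "")
--     other = len(rest)
--     return len(S) - other, other
-- ===== Notes on version B (the rewrite author's own statement) =====
-- stated objective: alternative
-- what changed: Instead of a branching per-character counter loop, B deletes the two AT symbols from the string via str.replace and measures the remainder: the second component is the filtered string's length and the first is derived as len(S) minus it.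
import Mathlib
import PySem

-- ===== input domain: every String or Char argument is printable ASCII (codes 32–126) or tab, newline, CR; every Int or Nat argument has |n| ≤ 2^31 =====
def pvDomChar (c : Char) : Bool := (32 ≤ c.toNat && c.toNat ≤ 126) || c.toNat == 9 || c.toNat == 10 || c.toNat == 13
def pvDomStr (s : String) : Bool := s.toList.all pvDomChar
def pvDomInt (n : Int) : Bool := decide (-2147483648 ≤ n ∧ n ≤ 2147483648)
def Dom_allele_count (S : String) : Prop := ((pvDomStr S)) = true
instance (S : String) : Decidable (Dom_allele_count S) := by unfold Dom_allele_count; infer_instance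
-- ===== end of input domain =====

-- B deletes every 'A' and 'T' with str.replace and measures the remainder (gc = len(rest), at = len(S) - gc) instead of A's branching counter loop; alternative decomposition, same cost.


-- ===== PORT A =====
-- at = 0; gc = 0; for s in S: if s == "A" or s == "T": at += 1 else: gc += 1; return at, gc
def allele_count (S : String) : Int × Int :=
  S.toList.foldl
    (fun (p : Int × Int) s => if s == 'A' || s == 'T' then (p.1 + 1, p.2) else (p.1, p.2 + 1))
    (0, 0)

-- ===== PORT B =====
-- rest = S.replace("A", "").replace("T", ""); gc = len(rest); return len(S) - gc, gc
def allele_count_alt (S : String) : Int × Int :=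
  let rest := PySem.Str.replace (PySem.Str.replace S "A" "") "T" ""
  let gc : Int := (PySem.Str.len rest : Int)
  ((PySem.Str.len S : Int) - gc, gc)

-- ===== PRECONDITION & SPEC =====
def Spec_allele_count (S : String) (out : Int × Int) : Prop := out = allele_count_alt S
instance (S : String) (out : Int × Int) : Decidable (Spec_allele_count S out) := by unfold Spec_allele_count; infer_instance

-- ===== CLAIM =====
def Claim_equal_allele_count : Prop := ∀ (S : String), Dom_allele_count S → Spec_allele_count S (allele_count S)

-- ===== LEMMAS AND PROOFS =====

-- replace.go with a single-character pattern and empty replacement is a filter.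
theorem replace_go_single (c : Char) :
    ∀ (l : List Char) (fuel : Nat) (acc : List Char), l.length ≤ fuel →
      PySem.Chars.replace.go [c] [] fuel l acc = acc.reverse ++ l.filter (fun x => x ≠ c) := by
  intro l
  induction l with
  | nil =>
      intro fuel acc _
      cases fuel <;> simp [PySem.Chars.replace.go]
  | cons h t ih =>
      intro fuel acc hle
      cases fuel with
      | zero => simp at hle
      | succ n =>
          simp only [List.length_cons, Nat.succ_le_succ_iff] at hle
          rw [PySem.Chars.replace.go]
          by_cases hc : h = c
          · subst hc
            have hp : [h].isPrefixOf (h :: t) = true := by simp [List.isPrefixOf]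
            rw [hp]
            simp only [if_true, List.length_singleton, List.drop_succ_cons, List.drop_zero,
              List.reverse_nil, List.nil_append]
            rw [ih n acc hle]
            simp
          · have hch : c ≠ h := fun e => hc e.symm
            have hp : [c].isPrefixOf (h :: t) = false := by simp [List.isPrefixOf, hch]
            rw [hp]
            simp only [Bool.false_eq_true, if_false]
            rw [ih n (h :: acc) hle]
            simp [hc]

-- Chars.replace deleting one character is a filter.
theorem chars_replace_single (l : List Char) (c : Char) :
    PySem.Chars.replace l [c] [] = l.filter (fun x => x ≠ c) := by
  simp [PySem.Chars.replace, replace_go_single c l l.length [] (le_refl _)]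

-- A's loop, with a general accumulator, adds countP and its complement.
theorem foldl_AT (l : List Char) :
    ∀ (a g : Int),
      l.foldl (fun (p : Int × Int) s =>
          if s == 'A' || s == 'T' then (p.1 + 1, p.2) else (p.1, p.2 + 1)) (a, g)
        = (a + (l.countP (fun s => s == 'A' || s == 'T') : Int),
           g + (l.countP (fun s => !(s == 'A' || s == 'T')) : Int)) := by
  induction l with
  | nil => intro a g; simp
  | cons h t ih =>
      intro a g
      by_cases hp : (h == 'A' || h == 'T') = true
      · rw [List.foldl_cons, if_pos hp, ih, List.countP_cons, List.countP_cons]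
        rw [if_pos hp, if_neg (by simp [hp])]
        push_cast
        exact Prod.ext (by ring) (by ring)
      · rw [List.foldl_cons, if_neg hp, ih, List.countP_cons, List.countP_cons]
        rw [if_neg hp, if_pos (by simp [hp])]
        push_cast
        exact Prod.ext (by ring) (by ring)

-- ===== VERDICT =====
theorem allele_count_spec : Claim_equal_allele_count := by
  intro S _
  unfold Spec_allele_count allele_count allele_count_alt
  rw [foldl_AT]
  have hA : "A".toList = ['A'] := rfl
  have hT : "T".toList = ['T'] := rfl
  have hE : "".toList = ([] : List Char) := rfl
  simp only [PySem.Str.len, PySem.Str.toList_replace, hA, hT, hE,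
    chars_replace_single, List.filter_filter]
  have hcount : (List.filter (fun a => decide (a ≠ 'T') && decide (a ≠ 'A')) S.toList).length
      = S.toList.countP (fun s => !(s == 'A' || s == 'T')) := by
    rw [← List.countP_eq_length_filter]
    apply List.countP_congr
    intro a _
    by_cases h1 : a = 'A' <;> by_cases h2 : a = 'T' <;> simp [h1, h2]
  have hlen := List.length_eq_countP_add_countP (p := fun s => s == 'A' || s == 'T')
    (l := S.toList)
  have hlen2 : S.toList.countP (fun a => decide ¬(a == 'A' || a == 'T') = true)
      = S.toList.countP (fun s => !(s == 'A' || s == 'T')) := by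
    apply List.countP_congr; intro a _; simp
  rw [hcount]
  rw [hlen2] at hlen
  simp only [Prod.mk.injEq]
  constructor <;> [omega; omega]
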